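-- pv_equiv track=rewrite | github.com/NanChanNN/FlowHON | code/hon_or/main_hon.py | getTracingTime
-- ===== SOURCE A (Python) =====
-- def getTracingTime(RawTrajectories):
--     nodeTracingTime = []
--
--     for movement in RawTrajectories:
--         current = []
--         movement = movement[1]
--         prevNode = int(movement[0])
--         times = 1
--         for node in movement[1:]:
--             node = int(node)
--             if prevNode != node:
--                 current.append(tuple([prevNode, times]))
--                 prevNode = node
--                 times = 0
--             times+=1
--
--         nodeTracingTime.append(current)
--
--     return nodeTracingTime
-- ===== SOURCE B (Python) =====
-- def getTracingTime(RawTrajectories):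
--     nodeTracingTime = []
--     for movement in RawTrajectories:
--         seq = [int(x) for x in movement[1]]
--         # phase 1: positions where the value changes, together with the value that just ended
--         changes = [(i, a) for i, (a, b) in enumerate(zip(seq, seq[1:]), 1) if a != b]
--         # phase 2: run lengths are the gaps between consecutive change positions
--         runs = []
--         start = 0
--         for i, v in changes:
--             runs.append((v, i - start))
--             start = i
--         nodeTracingTime.append(runs)
--     return nodeTracingTime
-- ===== Notes on version B (the rewrite author's own statement) =====
-- stated objective: alternative
-- what changed: A's single-pass prev/counter scan that emits a run at each change is replaced by a two-phase decomposition: first list the change positions (paired with the value that just ended) via enumerate/zip, then derive run lengths from the gaps between consecutive change positions.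
import Mathlib
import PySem

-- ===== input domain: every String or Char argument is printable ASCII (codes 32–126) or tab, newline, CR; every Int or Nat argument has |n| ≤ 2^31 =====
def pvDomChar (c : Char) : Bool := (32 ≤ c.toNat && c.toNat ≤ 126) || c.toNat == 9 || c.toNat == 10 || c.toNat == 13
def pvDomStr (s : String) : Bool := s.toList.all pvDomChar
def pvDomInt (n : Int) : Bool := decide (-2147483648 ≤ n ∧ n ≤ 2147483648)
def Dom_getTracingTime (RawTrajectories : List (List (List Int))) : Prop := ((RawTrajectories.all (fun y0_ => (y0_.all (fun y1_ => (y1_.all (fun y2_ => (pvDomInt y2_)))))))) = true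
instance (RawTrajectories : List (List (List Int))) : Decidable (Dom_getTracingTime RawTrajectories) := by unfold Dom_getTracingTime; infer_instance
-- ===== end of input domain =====

-- B replaces A's single-pass counter loop by a two-phase decomposition (list the change
-- positions with the value that ended there, then derive run lengths from the index gaps);
-- objective: alternative (same cost, different structure).


-- ===== PORT A =====
-- literal transliteration of A: for each movement take movement[1], read its head,
-- then scan the tail keeping (current, prevNode, times); the final run is never appended.
def getTracingTime (RawTrajectories : List (List (List Int))) : List (List (Int × Int)) :=
  RawTrajectories.foldl (fun nodeTracingTime movement =>
    match PySem.List.pyGet? movement 1 with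
    | none => nodeTracingTime        -- IndexError in Python (excluded by Pre_)
    | some mv =>
      match PySem.List.pyGet? mv 0 with
      | none => nodeTracingTime      -- IndexError in Python (excluded by Pre_)
      | some prev0 =>
        let st := (PySem.List.slice mv (some 1) none).foldl
          (fun (s : List (Int × Int) × Int × Int) node =>
            if s.2.1 ≠ node then (s.1 ++ [(s.2.1, s.2.2)], node, 0 + 1)
            else (s.1, s.2.1, s.2.2 + 1))
          ([], prev0, 1)
        nodeTracingTime ++ [st.1]) []

-- ===== PORT B =====
-- literal transliteration of B: change positions paired with the ended value, then a walk
-- over the change list turning index gaps into run lengths.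
def getTracingTime_alt (RawTrajectories : List (List (List Int))) : List (List (Int × Int)) :=
  RawTrajectories.foldl (fun nodeTracingTime movement =>
    match PySem.List.pyGet? movement 1 with
    | none => nodeTracingTime        -- IndexError in Python (excluded by Pre_)
    | some seq =>
      let changes := ((PySem.List.enumerate (seq.zip (PySem.List.slice seq (some 1) none)) 1).filter
          (fun x => x.2.1 ≠ x.2.2)).map (fun x => (x.1, x.2.1))
      let runs := (changes.foldl (fun (s : List (Int × Int) × Int) c =>
          (s.1 ++ [(c.2, c.1 - s.2)], c.1)) ([], 0)).1
      nodeTracingTime ++ [runs]) []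

-- ===== PRECONDITION & SPEC =====
-- Pre_ excludes exactly the inputs on which Python A raises IndexError: a movement with
-- fewer than two components (movement[1]) or an empty movement[1] (movement[0] inside it).
def Pre_getTracingTime (RawTrajectories : List (List (List Int))) : Prop :=
  ∀ m ∈ RawTrajectories, 2 ≤ m.length ∧ m.getD 1 [] ≠ []
instance (RawTrajectories : List (List (List Int))) : Decidable (Pre_getTracingTime RawTrajectories) := by unfold Pre_getTracingTime; infer_instance
def pvWitness_getTracingTime : List (List (List Int)) := [[[0], [1, 1, 2, 2, 3]], [[5], [4]]]

def Spec_getTracingTime (RawTrajectories : List (List (List Int))) (out : List (List (Int × Int))) : Prop := out = getTracingTime_alt RawTrajectories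
instance (RawTrajectories : List (List (List Int))) (out : List (List (Int × Int))) : Decidable (Spec_getTracingTime RawTrajectories out) := by unfold Spec_getTracingTime; infer_instance

-- ===== CLAIM (what is proved, stated in full; the proofs are below) =====
def Claim_equal_getTracingTime : Prop := ∀ (RawTrajectories : List (List (List Int))), Dom_getTracingTime RawTrajectories → Pre_getTracingTime RawTrajectories → Spec_getTracingTime RawTrajectories (getTracingTime RawTrajectories)

-- ===== LEMMAS AND PROOFS =====

-- A's inner loop without its accumulator.
def fA : List Int → Int → Int → List (Int × Int)
  | [], _, _ => []
  | n :: ns, prev, times =>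
    if prev ≠ n then (prev, times) :: fA ns n (0 + 1) else fA ns prev (times + 1)

lemma foldA (rest : List Int) (cur : List (Int × Int)) (prev times : Int) :
    (rest.foldl (fun (s : List (Int × Int) × Int × Int) node =>
        if s.2.1 ≠ node then (s.1 ++ [(s.2.1, s.2.2)], node, 0 + 1)
        else (s.1, s.2.1, s.2.2 + 1)) (cur, prev, times)).1
      = cur ++ fA rest prev times := by
  induction rest generalizing cur prev times with
  | nil => simp [fA]
  | cons n ns ih =>
    rw [List.foldl_cons]
    by_cases h : prev = n
    · rw [if_neg (by simp [h])]
      rw [ih]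
      simp [fA, h]
    · rw [if_pos (by simpa using h)]
      rw [ih]
      simp [fA, h]

-- B's change list without enumerate/zip: chg xs i lists, for each position where xs changes,
-- (absolute index of the new value counted from i for xs's second element, old value).
def chg : List Int → Int → List (Int × Int)
  | [], _ => []
  | [_], _ => []
  | a :: b :: t, i => (if a ≠ b then [(i, a)] else []) ++ chg (b :: t) (i + 1)

lemma chg_eq (xs : List Int) (s : Int) :
    ((PySem.List.enumerate (xs.zip (xs.drop 1)) s).filter
        (fun x => x.2.1 ≠ x.2.2)).map (fun x => (x.1, x.2.1)) = chg xs s := by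
  induction xs generalizing s with
  | nil => simp [chg, PySem.List.enumerate_nil]
  | cons a xs ih =>
    cases xs with
    | nil => simp [chg, PySem.List.enumerate_nil]
    | cons b t =>
      by_cases h : a = b
      all_goals
        simpa [chg, PySem.List.enumerate_cons, List.zip, h, List.drop_one] using ih (s + 1)

-- B's second phase without its accumulator.
def walk : List (Int × Int) → Int → List (Int × Int)
  | [], _ => []
  | c :: cs, start => (c.2, c.1 - start) :: walk cs c.1

lemma foldB (cs : List (Int × Int)) (cur : List (Int × Int)) (start : Int) :
    (cs.foldl (fun (s : List (Int × Int) × Int) c =>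
        (s.1 ++ [(c.2, c.1 - s.2)], c.1)) (cur, start)).1 = cur ++ walk cs start := by
  induction cs generalizing cur start with
  | nil => simp [walk]
  | cons c cs ih => simp [List.foldl, walk, ih]

-- the bridge: walking the change list reproduces A's counter scan.
lemma walk_chg (xs : List Int) (a s t : Int) :
    walk (chg (a :: xs) (s + t)) s = fA xs a t := by
  induction xs generalizing a s t with
  | nil => simp [chg, walk, fA]
  | cons b u ih =>
    by_cases h : a = b
    · subst h
      simp only [chg, fA, ne_eq, not_true_eq_false, if_false, List.nil_append]
      have h1 : s + t + 1 = s + (t + 1) := by ring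
      rw [h1]
      exact ih a s (t + 1)
    · simp only [chg, fA, if_pos (show a ≠ b from h), List.singleton_append, walk]
      have h2 : s + t - s = t := by ring
      rw [h2]
      have := ih (a := b) (s := s + t) (t := 1)
      rw [this]
      norm_num

-- one trajectory: A's counter scan equals B's change-walk.
lemma step_eq (acc : List (List (Int × Int))) (m : List (List Int))
    (hlen : 2 ≤ m.length) (hne : m.getD 1 [] ≠ []) :
    (match PySem.List.pyGet? m 1 with
      | none => acc
      | some mv =>
        match PySem.List.pyGet? mv 0 with
        | none => acc
        | some prev0 =>
          acc ++ [((PySem.List.slice mv (some 1) none).foldl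
            (fun (s : List (Int × Int) × Int × Int) node =>
              if s.2.1 ≠ node then (s.1 ++ [(s.2.1, s.2.2)], node, 0 + 1)
              else (s.1, s.2.1, s.2.2 + 1)) ([], prev0, 1)).1])
    = (match PySem.List.pyGet? m 1 with
      | none => acc
      | some seq =>
        acc ++ [((((PySem.List.enumerate (seq.zip (PySem.List.slice seq (some 1) none)) 1).filter
            (fun x => x.2.1 ≠ x.2.2)).map (fun x => (x.1, x.2.1))).foldl
          (fun (s : List (Int × Int) × Int) c =>
            (s.1 ++ [(c.2, c.1 - s.2)], c.1)) ([], 0)).1]) := by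
  match m, hlen with
  | m0 :: m1 :: mr, _ =>
    have hget : PySem.List.pyGet? (m0 :: m1 :: mr) (1 : Int) = some m1 := by
      simp [PySem.List.pyGet?, PySem.List.pyIdx?]
    rw [hget]
    have hm1 : m1 ≠ [] := by simpa using hne
    match m1, hm1 with
    | p0 :: rest, _ =>
      dsimp only
      have h0 : PySem.List.pyGet? (p0 :: rest) (0 : Int) = some p0 := by
        simp [PySem.List.pyGet?, PySem.List.pyIdx?]
      rw [h0]
      dsimp only
      have hs : PySem.List.slice (p0 :: rest) (some 1) none = rest := by
        simp [PySem.List.slice_some_none, PySem.List.clampIdx]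
      rw [hs]
      rw [foldA]
      have hc := chg_eq (p0 :: rest) 1
      simp only [List.drop_one, List.tail_cons] at hc
      rw [hc, foldB]
      have := walk_chg rest p0 0 1
      simp only [zero_add] at this
      rw [this]

theorem getTracingTime_spec : Claim_equal_getTracingTime := by
  intro R _hdom hpre
  unfold Spec_getTracingTime getTracingTime getTracingTime_alt
  apply PySem.List.foldl_congr_mem
  intro acc m hm
  exact step_eq acc m (hpre m hm).1 (hpre m hm).2
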